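-- pv_equiv track=rewrite | github.com/scheott/gentle | app/checker.py | combine_verdict
-- ===== SOURCE A (Python) =====
-- LOW_REP_DOMAINS = {
--     # seed a few; expand from CSV later
--     "clickbait.example": "low_domain_rep",
--     "giveaway.example": "low_domain_rep",
-- }
--
-- def combine_verdict(domain: str, labels: dict, noise: int):
--     reasons = []
--     # domain reputation
--     if domain in LOW_REP_DOMAINS:
--         reasons.append("low_domain_rep")
--     # label-based
--     if labels.get("headline_style") == "clickbait":
--         reasons.append("clickbait")
--     if labels.get("tone") == "sensational":
--         reasons.append("sensational_tone")
--     if labels.get("scam_signal") == "strong":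
--         reasons.append("scam_signals")
--     if labels.get("health_claim") == "present":
--         reasons.append("health_claims")
--     if noise >= 3:
--         reasons.append("intrusive_ui")
--
--     # weight to band
--     weight = 0
--     for r in reasons:
--         weight += {
--             "scam_signals": 3,
--             "low_domain_rep": 2,
--             "health_claims": 2,
--             "clickbait": 1,
--             "sensational_tone": 1,
--             "intrusive_ui": 1,
--         }.get(r, 0)
--
--     if "scam_signals" in reasons or weight >= 4:
--         verdict = "danger"
--     elif weight >= 2:
--         verdict = "warning"
--     else:
--         verdict = "ok"
--     return verdict, reasons
-- ===== SOURCE B (Python) =====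
-- LOW_REP_DOMAINS = {
--     "clickbait.example": "low_domain_rep",
--     "giveaway.example": "low_domain_rep",
-- }
--
-- # Condition bit i corresponds to label _LABELS[i]; weights 2,1,1,3,2,1.
-- _LABELS = ("low_domain_rep", "clickbait", "sensational_tone",
--            "scam_signals", "health_claims", "intrusive_ui")
-- _WEIGHTS = (2, 1, 1, 3, 2, 1)
--
-- def _band(mask):
--     w = sum(_WEIGHTS[i] for i in range(6) if mask >> i & 1)
--     if mask & 8 or w >= 4:
--         return "danger"
--     if w >= 2:
--         return "warning"
--     return "ok"
--
-- # Precomputed verdict for every one of the 64 possible condition bitmasks.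
-- _VERDICTS = tuple(_band(m) for m in range(64))
--
-- def combine_verdict(domain: str, labels: dict, noise: int):
--     mask = ((domain in LOW_REP_DOMAINS)
--             | (labels.get("headline_style") == "clickbait") << 1
--             | (labels.get("tone") == "sensational") << 2
--             | (labels.get("scam_signal") == "strong") << 3
--             | (labels.get("health_claim") == "present") << 4
--             | (noise >= 3) << 5)
--     return _VERDICTS[mask], [lab for i, lab in enumerate(_LABELS) if mask >> i & 1]
-- ===== Notes on version B (the rewrite author's own statement) =====
-- stated objective: alternative
-- what changed: Replaces the six-branch if-chain plus a weight-summing loop over an inline dict by a bitmask algorithm: the six conditions are packed into a 6-bit mask, the verdict is read from a 64-entry table precomputed once at module load from a closed-form weight sum, and the reasons list is produced by filtering the fixed label list on the mask's bits.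
import Mathlib
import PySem

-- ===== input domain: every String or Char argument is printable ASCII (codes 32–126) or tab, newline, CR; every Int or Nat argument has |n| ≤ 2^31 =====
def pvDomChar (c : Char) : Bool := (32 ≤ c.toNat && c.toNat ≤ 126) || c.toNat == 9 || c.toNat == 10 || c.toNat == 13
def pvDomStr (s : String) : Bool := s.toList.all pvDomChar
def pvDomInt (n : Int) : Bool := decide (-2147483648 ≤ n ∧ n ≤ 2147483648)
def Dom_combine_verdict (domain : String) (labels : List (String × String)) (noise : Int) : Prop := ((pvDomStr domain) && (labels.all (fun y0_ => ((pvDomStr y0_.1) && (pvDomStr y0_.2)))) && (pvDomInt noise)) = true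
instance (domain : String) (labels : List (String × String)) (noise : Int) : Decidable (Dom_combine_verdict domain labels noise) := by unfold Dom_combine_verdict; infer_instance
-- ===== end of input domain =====

-- B encodes the six conditions as a 6-bit mask, reads the verdict from a 64-entry table
-- precomputed once from a closed-form weight sum, and derives the reasons list by filtering
-- the fixed label list on the mask's bits (objective: alternative, table-lookup algorithm).

-- ===== PORT A =====
def LOW_REP_DOMAINS : PySem.Dict String String :=
  PySem.Dict.mk [("clickbait.example", "low_domain_rep"), ("giveaway.example", "low_domain_rep")]

def combine_verdict (domain : String) (labels : List (String × String)) (noise : Int) : String × List String :=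
  let lbl := PySem.Dict.mk labels
  let reasons : List String := []
  let reasons := if LOW_REP_DOMAINS.contains domain then reasons ++ ["low_domain_rep"] else reasons
  let reasons := if lbl.get? "headline_style" == some "clickbait" then reasons ++ ["clickbait"] else reasons
  let reasons := if lbl.get? "tone" == some "sensational" then reasons ++ ["sensational_tone"] else reasons
  let reasons := if lbl.get? "scam_signal" == some "strong" then reasons ++ ["scam_signals"] else reasons
  let reasons := if lbl.get? "health_claim" == some "present" then reasons ++ ["health_claims"] else reasons
  let reasons := if decide (noise ≥ 3) then reasons ++ ["intrusive_ui"] else reasons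
  let weight : Int := reasons.foldl (fun w r =>
    w + (PySem.Dict.mk [("scam_signals", (3 : Int)), ("low_domain_rep", 2), ("health_claims", 2),
                        ("clickbait", 1), ("sensational_tone", 1), ("intrusive_ui", 1)]).getD r 0) 0
  let verdict := if reasons.contains "scam_signals" || decide (weight ≥ 4) then "danger"
                 else if decide (weight ≥ 2) then "warning" else "ok"
  (verdict, reasons)

-- ===== PORT B =====
def altLabels : List String :=
  ["low_domain_rep", "clickbait", "sensational_tone", "scam_signals", "health_claims", "intrusive_ui"]
def altWeights : List Int := [2, 1, 1, 3, 2, 1]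

def altBand (mask : Nat) : String :=
  let w : Int := ((List.range 6).filter (fun i => mask >>> i &&& 1 == 1)).foldl
    (fun a i => a + altWeights.getD i 0) 0
  if mask &&& 8 != 0 || decide (w ≥ 4) then "danger"
  else if decide (w ≥ 2) then "warning" else "ok"

def altVerdicts : List String := (List.range 64).map altBand

def combine_verdict_alt (domain : String) (labels : List (String × String)) (noise : Int) : String × List String :=
  let lbl := PySem.Dict.mk labels
  let mask : Nat :=
    (if LOW_REP_DOMAINS.contains domain then 1 else 0) |||
    ((if lbl.get? "headline_style" == some "clickbait" then 1 else 0) <<< 1) |||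
    ((if lbl.get? "tone" == some "sensational" then 1 else 0) <<< 2) |||
    ((if lbl.get? "scam_signal" == some "strong" then 1 else 0) <<< 3) |||
    ((if lbl.get? "health_claim" == some "present" then 1 else 0) <<< 4) |||
    ((if decide (noise ≥ 3) then 1 else 0) <<< 5)
  -- mask < 64, so the table index is always in range; getD's default is never used
  (altVerdicts.getD mask "ok",
   ((PySem.List.enumerate altLabels).filter (fun p => mask >>> p.1.toNat &&& 1 == 1)).map (·.2))

-- ===== PRECONDITION & SPEC =====
def Spec_combine_verdict (domain : String) (labels : List (String × String)) (noise : Int) (out : String × List String) : Prop := out = combine_verdict_alt domain labels noise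
instance (domain : String) (labels : List (String × String)) (noise : Int) (out : String × List String) : Decidable (Spec_combine_verdict domain labels noise out) := by unfold Spec_combine_verdict; infer_instance

-- ===== CLAIM (what is proved, stated in full; the proofs are below) =====
def Claim_equal_combine_verdict : Prop := ∀ (domain : String) (labels : List (String × String)) (noise : Int), Dom_combine_verdict domain labels noise → Spec_combine_verdict domain labels noise (combine_verdict domain labels noise)

-- ===== LEMMAS AND PROOFS =====

-- A's computation abstracted over its six boolean conditions
def mkA (b1 b2 b3 b4 b5 b6 : Bool) : String × List String :=
  let reasons : List String := []
  let reasons := if b1 then reasons ++ ["low_domain_rep"] else reasons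
  let reasons := if b2 then reasons ++ ["clickbait"] else reasons
  let reasons := if b3 then reasons ++ ["sensational_tone"] else reasons
  let reasons := if b4 then reasons ++ ["scam_signals"] else reasons
  let reasons := if b5 then reasons ++ ["health_claims"] else reasons
  let reasons := if b6 then reasons ++ ["intrusive_ui"] else reasons
  let weight : Int := reasons.foldl (fun w r =>
    w + (PySem.Dict.mk [("scam_signals", (3 : Int)), ("low_domain_rep", 2), ("health_claims", 2),
                        ("clickbait", 1), ("sensational_tone", 1), ("intrusive_ui", 1)]).getD r 0) 0
  let verdict := if reasons.contains "scam_signals" || decide (weight ≥ 4) then "danger"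
                 else if decide (weight ≥ 2) then "warning" else "ok"
  (verdict, reasons)

-- B's computation abstracted over the same six booleans
def mkB (b1 b2 b3 b4 b5 b6 : Bool) : String × List String :=
  let mask : Nat :=
    (if b1 then 1 else 0) ||| ((if b2 then 1 else 0) <<< 1) ||| ((if b3 then 1 else 0) <<< 2) |||
    ((if b4 then 1 else 0) <<< 3) ||| ((if b5 then 1 else 0) <<< 4) ||| ((if b6 then 1 else 0) <<< 5)
  (altVerdicts.getD mask "ok",
   ((PySem.List.enumerate altLabels).filter (fun p => mask >>> p.1.toNat &&& 1 == 1)).map (·.2))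

theorem combine_verdict_eq_mkA (domain : String) (labels : List (String × String)) (noise : Int) :
    combine_verdict domain labels noise =
      mkA (LOW_REP_DOMAINS.contains domain)
          ((PySem.Dict.mk labels).get? "headline_style" == some "clickbait")
          ((PySem.Dict.mk labels).get? "tone" == some "sensational")
          ((PySem.Dict.mk labels).get? "scam_signal" == some "strong")
          ((PySem.Dict.mk labels).get? "health_claim" == some "present")
          (decide (noise ≥ 3)) := rfl

theorem combine_verdict_alt_eq_mkB (domain : String) (labels : List (String × String)) (noise : Int) :
    combine_verdict_alt domain labels noise =
      mkB (LOW_REP_DOMAINS.contains domain)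
          ((PySem.Dict.mk labels).get? "headline_style" == some "clickbait")
          ((PySem.Dict.mk labels).get? "tone" == some "sensational")
          ((PySem.Dict.mk labels).get? "scam_signal" == some "strong")
          ((PySem.Dict.mk labels).get? "health_claim" == some "present")
          (decide (noise ≥ 3)) := rfl

theorem mkA_eq_mkB : ∀ b1 b2 b3 b4 b5 b6 : Bool, mkA b1 b2 b3 b4 b5 b6 = mkB b1 b2 b3 b4 b5 b6 := by
  decide

-- ===== VERDICT (by name: the statement is the Claim_ definition above) =====
theorem combine_verdict_spec : Claim_equal_combine_verdict := by
  intro domain labels noise _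
  show combine_verdict domain labels noise = combine_verdict_alt domain labels noise
  rw [combine_verdict_eq_mkA, combine_verdict_alt_eq_mkB, mkA_eq_mkB]
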